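-- pv_equiv track=rewrite | github.com/jerrylee17/Algorithms | GoogleCompetitions/CodeJam/2020/problem5.py | fillSquare
-- ===== SOURCE A (Python) =====
-- def checkRow(arr, row, num, n):
--     for i in range(n):
--         if(arr[row][i] == num):
--             return True
--     return False
--
-- def checkCol(arr, col, num, n):
--     for i in range(n):
--         if(arr[i][col] == num):
--             return True
--     return False
--
-- def checkSafe(arr, row, col, num, n ):
--     return not checkRow(arr, row, num, n) and not checkCol(arr, col, num, n)
--
-- def getEmpty(arr, l, n):
--     for r in range(n):
--         for c in range(n):
--             if arr[r][c] == 0: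
--                 l[0], l[1] = r, c
--                 return True
--     return False
--
-- def fillSquare(arr):
--     n = len(arr)
--     # position of where we're checking
--     l=[0,0]
--     if(not getEmpty(arr, l, n)):
--         return True
--     row=l[0]
--     col=l[1]
--     for num in range(1, n+1):
--         if(checkSafe(arr, row, col, num, n)):
--             arr[row][col]=num
--             if(fillSquare(arr)):
--                 return True
--             arr[row][col] = 0
--     return False
-- ===== SOURCE B (Python) =====
-- def fillSquare(arr):
--     # Return-value equivalent to A (A also mutates arr in place; B does not).
--     # Precompute the empty cells once and maintain row/column occupancy sets,
--     # so each backtracking node does O(n) work instead of rescanning the grid.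
--     n = len(arr)
--     empties = [(r, c) for r in range(n) for c in range(n) if arr[r][c] == 0]
--     rows = [set(arr[r][:n]) for r in range(n)]
--     cols = [set(arr[i][c] for i in range(n)) for c in range(n)]
--
--     def solve(k):
--         if k == len(empties):
--             return True
--         r, c = empties[k]
--         for num in range(1, n + 1):
--             if num not in rows[r] and num not in cols[c]:
--                 rows[r].add(num)
--                 cols[c].add(num)
--                 if solve(k + 1):
--                     return True
--                 rows[r].discard(num)
--                 cols[c].discard(num)
--         return False
--
--     return solve(0)
-- ===== Notes on version B (the rewrite author's own statement) =====
-- stated objective: faster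
-- what changed: B precomputes the list of empty cells once and maintains per-row/per-column occupancy sets, so each backtracking node does O(n) set checks instead of A's O(n^2) grid rescan (getEmpty) plus row/column scans; B does not mutate arr.
-- outside the precondition, e.g. on fillSquare([[0, 2], [1]]): A returns False, B raises IndexError
import Mathlib
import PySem

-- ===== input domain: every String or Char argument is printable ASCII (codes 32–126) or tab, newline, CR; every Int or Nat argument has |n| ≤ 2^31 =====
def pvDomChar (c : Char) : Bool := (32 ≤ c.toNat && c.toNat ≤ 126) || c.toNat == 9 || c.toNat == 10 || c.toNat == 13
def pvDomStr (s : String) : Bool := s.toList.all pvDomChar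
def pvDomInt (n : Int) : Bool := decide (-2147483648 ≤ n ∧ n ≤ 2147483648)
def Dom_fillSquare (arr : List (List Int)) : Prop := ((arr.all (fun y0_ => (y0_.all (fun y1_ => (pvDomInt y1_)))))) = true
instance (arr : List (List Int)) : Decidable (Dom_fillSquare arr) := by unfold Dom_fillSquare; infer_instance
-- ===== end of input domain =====

-- B precomputes the empty cells once and keeps row/column occupancy sets (the mechanism the
-- timing run measures); equivalence is about the RETURN value: A mutates arr, B does not.

-- ===== PORT A =====
-- every index A uses is in range under Pre_fillSquare, where getD is exact
def cellGet (arr : List (List Int)) (r c : Nat) : Int := (arr.getD r []).getD c 0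

def checkRow (arr : List (List Int)) (row : Nat) (num : Int) (n : Nat) : Bool :=
  (List.range n).any fun i => cellGet arr row i == num

def checkCol (arr : List (List Int)) (col : Nat) (num : Int) (n : Nat) : Bool :=
  (List.range n).any fun i => cellGet arr i col == num

def checkSafe (arr : List (List Int)) (row col : Nat) (num : Int) (n : Nat) : Bool :=
  !checkRow arr row num n && !checkCol arr col num n

-- A's nested "for r: for c: if arr[r][c]==0: return r,c": first match in row-major order
def posList (n : Nat) : List (Nat × Nat) :=
  (List.range n).flatMap fun r => (List.range n).map fun c => (r, c)

def getEmpty (arr : List (List Int)) (n : Nat) : Option (Nat × Nat) :=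
  (posList n).find? fun rc => cellGet arr rc.1 rc.2 == 0

def setCell (arr : List (List Int)) (r c : Nat) (v : Int) : List (List Int) :=
  arr.modify r (fun row => row.set c v)

-- fuel guard only: n*n+1 strictly exceeds the number of empty cells, which drops by one per call
def fillGo (n : Nat) : Nat → List (List Int) → Bool
  | 0, _ => false
  | fuel + 1, arr =>
    match getEmpty arr n with
    | none => true
    | some (row, col) =>
      (List.range n).any fun k =>
        checkSafe arr row col ((k : Int) + 1) n && fillGo n fuel (setCell arr row col ((k : Int) + 1))

def fillSquare (arr : List (List Int)) : Bool :=
  fillGo arr.length (arr.length * arr.length + 1) arr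

-- ===== PORT B =====
-- Source B's solve(k): structural recursion on the suffix empties[k:]; the sets are persistent
-- here, so the add/discard backtracking pair of Source B becomes a plain add on the branch
def solveB (n : Nat) : List (Nat × Nat) → List (PySem.Set Int) → List (PySem.Set Int) → Bool
  | [], _, _ => true
  | (r, c) :: rest, rows, cols =>
    (List.range n).any fun k =>
      !((rows.getD r []).contains ((k : Int) + 1)) && !((cols.getD c []).contains ((k : Int) + 1)) &&
        solveB n rest (rows.modify r (fun s => s.add ((k : Int) + 1)))
                      (cols.modify c (fun s => s.add ((k : Int) + 1)))

def fillSquare_alt (arr : List (List Int)) : Bool :=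
  let n := arr.length
  let empties := (List.range n).flatMap fun r =>
    ((List.range n).filter fun c => (arr.getD r []).getD c 0 == 0).map fun c => (r, c)
  let rows := (List.range n).map fun r => PySem.Set.ofList ((arr.getD r []).take n)
  let cols := (List.range n).map fun c => PySem.Set.ofList ((List.range n).map fun i => (arr.getD i []).getD c 0)
  solveB n empties rows cols

-- ===== PRECONDITION & SPEC =====
-- Pre_ excludes ragged grids with a row shorter than len(arr): there A's scans raise IndexError
-- in general (A happens to return on a few such grids, e.g. [[0,2],[1]], where B's column-set
-- construction raises instead).
def Pre_fillSquare (arr : List (List Int)) : Prop := ∀ row ∈ arr, arr.length ≤ row.length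
instance (arr : List (List Int)) : Decidable (Pre_fillSquare arr) := by unfold Pre_fillSquare; infer_instance

def pvWitness_fillSquare : List (List Int) := [[1, 0, 3], [0, 3, 0], [3, 0, 2]]

def Spec_fillSquare (arr : List (List Int)) (out : Bool) : Prop := out = fillSquare_alt arr
instance (arr : List (List Int)) (out : Bool) : Decidable (Spec_fillSquare arr out) := by unfold Spec_fillSquare; infer_instance

-- ===== CLAIM (what is proved, stated in full; the proofs are below) =====
def Claim_equal_fillSquare : Prop :=
  ∀ (arr : List (List Int)), Dom_fillSquare arr → Pre_fillSquare arr → Spec_fillSquare arr (fillSquare arr)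

-- ===== LEMMAS AND PROOFS =====

-- the grid shape the search preserves: n rows reachable, each reachable row with ≥ n cells
def Shape (n : Nat) (arr : List (List Int)) : Prop :=
  n ≤ arr.length ∧ ∀ r < n, n ≤ (arr.getD r []).length

-- the zero cells of the grid, in A's row-major scan order
def emptiesOf (arr : List (List Int)) (n : Nat) : List (Nat × Nat) :=
  (posList n).filter fun rc => cellGet arr rc.1 rc.2 == 0

theorem nodup_posList (n : Nat) : (posList n).Nodup := by
  have h : posList n = List.range n ×ˢ List.range n := rfl
  rw [h]; exact List.nodup_range.product List.nodup_range

theorem getD_modify {α : Type} (l : List α) (i j : Nat) (f : α → α) (d : α) :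
    (l.modify i f).getD j d = if j = i ∧ j < l.length then f (l.getD j d) else l.getD j d := by
  by_cases h2 : j < l.length
  · by_cases h1 : j = i
    · subst h1
      simp [List.getD_eq_getElem?_getD, h2]
    · have h1' : i ≠ j := fun h => h1 h.symm
      simp [List.getD_eq_getElem?_getD, h1, h1']
  · have h2' : l.length ≤ j := by omega
    simp [List.getD_eq_getElem?_getD, h2]

theorem getD_set {α : Type} (l : List α) (i j : Nat) (v : α) (d : α) :
    (l.set i v).getD j d = if j = i ∧ j < l.length then v else l.getD j d := by
  by_cases h2 : j < l.length
  · by_cases h1 : j = i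
    · subst h1
      simp [List.getD_eq_getElem?_getD, h2]
    · have h1' : i ≠ j := fun h => h1 h.symm
      simp [List.getD_eq_getElem?_getD, h1, h1']
  · have h2' : l.length ≤ j := by omega
    by_cases h1 : i = j
    · subst h1
      simp [List.getD_eq_getElem?_getD, (by omega : ¬ i < l.length)]
    · simp [List.getD_eq_getElem?_getD, h2]

theorem filter_eq_cons_surgery {α : Type} (l : List α) (p q : α → Bool) (a : α) (rest : List α)
    (hnd : l.Nodup) (hf : l.filter p = a :: rest) (hq : ∀ x ∈ l, x ≠ a → q x = p x)
    (hqa : q a = false) : l.filter q = rest := by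
  induction l with
  | nil => simp at hf
  | cons x t ih =>
    rw [List.nodup_cons] at hnd
    rw [List.filter_cons] at hf ⊢
    by_cases hpx : p x
    · rw [if_pos hpx] at hf
      injection hf with h1 h2
      subst h1
      rw [if_neg (by simp [hqa]), ← h2]
      exact List.filter_congr fun y hy =>
        hq y (List.mem_cons_of_mem _ hy) (fun h => hnd.1 (h ▸ hy))
    · rw [if_neg hpx] at hf
      have hat : a ∈ t := List.mem_of_mem_filter (by rw [hf]; exact List.mem_cons_self ..)
      have hxa : x ≠ a := fun h => hnd.1 (h ▸ hat)
      rw [if_neg (by rw [hq x (List.mem_cons_self ..) hxa]; exact hpx)]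
      exact ih hnd.2 hf (fun y hy => hq y (List.mem_cons_of_mem _ hy))

theorem checkRow_iff {arr : List (List Int)} {row : Nat} {num : Int} {n : Nat} :
    checkRow arr row num n = true ↔ ∃ i, i < n ∧ cellGet arr row i = num := by
  simp [checkRow]

theorem checkCol_iff {arr : List (List Int)} {col : Nat} {num : Int} {n : Nat} :
    checkCol arr col num n = true ↔ ∃ i, i < n ∧ cellGet arr i col = num := by
  simp [checkCol]

theorem cellGet_setCell (arr : List (List Int)) (r c r' c' : Nat) (v : Int) :
    cellGet (setCell arr r c v) r' c' =
      if r' = r ∧ c' = c ∧ r < arr.length ∧ c < (arr.getD r []).length then v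
      else cellGet arr r' c' := by
  unfold cellGet setCell
  rw [getD_modify]
  by_cases hr : r' = r
  · subst hr
    by_cases hrl : r' < arr.length
    · rw [if_pos ⟨rfl, hrl⟩, getD_set]
      by_cases hcc : c' = c
      · subst hcc
        simp [hrl]
      · simp [hcc]
    · rw [if_neg (by tauto), if_neg (by tauto)]
  · rw [if_neg (by tauto), if_neg (by tauto)]

theorem checkRow_setCell_ne (arr : List (List Int)) (r c : Nat) (v : Int) (row : Nat)
    (num : Int) (n : Nat) (h : row ≠ r) :
    checkRow (setCell arr r c v) row num n = checkRow arr row num n := by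
  unfold checkRow
  exact congrArg _ (funext fun i => by rw [cellGet_setCell, if_neg (by tauto)])

theorem checkCol_setCell_ne (arr : List (List Int)) (r c : Nat) (v : Int) (col : Nat)
    (num : Int) (n : Nat) (h : col ≠ c) :
    checkCol (setCell arr r c v) col num n = checkCol arr col num n := by
  unfold checkCol
  exact congrArg _ (funext fun i => by rw [cellGet_setCell, if_neg (by tauto)])

theorem checkRow_setCell_eq (arr : List (List Int)) (r c : Nat) (v num : Int) (n : Nat)
    (hr : r < arr.length) (hc : c < (arr.getD r []).length) (hcn : c < n)
    (h0 : cellGet arr r c = 0) (hnum : num ≠ 0) :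
    checkRow (setCell arr r c v) r num n = (checkRow arr r num n || (num == v)) := by
  rw [Bool.eq_iff_iff, Bool.or_eq_true, beq_iff_eq, checkRow_iff, checkRow_iff]
  constructor
  · rintro ⟨i, hi, hcell⟩
    by_cases hic : i = c
    · subst hic
      rw [cellGet_setCell, if_pos ⟨rfl, rfl, hr, hc⟩] at hcell
      exact Or.inr hcell.symm
    · rw [cellGet_setCell, if_neg (by tauto)] at hcell
      exact Or.inl ⟨i, hi, hcell⟩
  · rintro (⟨i, hi, hcell⟩ | hv)
    · have hic : i ≠ c := fun h => hnum (by rw [← hcell, h, h0])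
      exact ⟨i, hi, by rw [cellGet_setCell, if_neg (by tauto)]; exact hcell⟩
    · exact ⟨c, hcn, by rw [cellGet_setCell, if_pos ⟨rfl, rfl, hr, hc⟩]; exact hv.symm⟩

theorem checkCol_setCell_eq (arr : List (List Int)) (r c : Nat) (v num : Int) (n : Nat)
    (hr : r < arr.length) (hc : c < (arr.getD r []).length) (hrn : r < n)
    (h0 : cellGet arr r c = 0) (hnum : num ≠ 0) :
    checkCol (setCell arr r c v) c num n = (checkCol arr c num n || (num == v)) := by
  rw [Bool.eq_iff_iff, Bool.or_eq_true, beq_iff_eq, checkCol_iff, checkCol_iff]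
  constructor
  · rintro ⟨i, hi, hcell⟩
    by_cases hir : i = r
    · subst hir
      rw [cellGet_setCell, if_pos ⟨rfl, rfl, hr, hc⟩] at hcell
      exact Or.inr hcell.symm
    · rw [cellGet_setCell, if_neg (by tauto)] at hcell
      exact Or.inl ⟨i, hi, hcell⟩
  · rintro (⟨i, hi, hcell⟩ | hv)
    · have hir : i ≠ r := fun h => hnum (by rw [← hcell, h, h0])
      exact ⟨i, hi, by rw [cellGet_setCell, if_neg (by tauto)]; exact hcell⟩
    · exact ⟨r, hrn, by rw [cellGet_setCell, if_pos ⟨rfl, rfl, hr, hc⟩]; exact hv.symm⟩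

theorem contains_add (s : PySem.Set Int) (x y : Int) :
    (s.add x).contains y = (s.contains y || (y == x)) := by
  rw [Bool.eq_iff_iff]
  simp [PySem.Set.mem_add]

theorem mem_posList {n : Nat} {rc : Nat × Nat} : rc ∈ posList n ↔ rc.1 < n ∧ rc.2 < n := by
  obtain ⟨r, c⟩ := rc
  simp [posList]

theorem emptiesOf_head {arr : List (List Int)} {n r c : Nat} {rest : List (Nat × Nat)}
    (h : emptiesOf arr n = (r, c) :: rest) : r < n ∧ c < n ∧ cellGet arr r c = 0 := by
  have hm : (r, c) ∈ emptiesOf arr n := by rw [h]; exact List.mem_cons_self ..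
  have h2 := List.mem_filter.1 hm
  have h3 := mem_posList.1 h2.1
  exact ⟨h3.1, h3.2, by simpa using h2.2⟩

theorem getEmpty_eq (arr : List (List Int)) (n : Nat) :
    getEmpty arr n = (emptiesOf arr n).head? := by
  unfold getEmpty emptiesOf
  exact List.head?_filter.symm

theorem emptiesOf_setCell {arr : List (List Int)} {n r c : Nat} {rest : List (Nat × Nat)}
    (v : Int) (hv : v ≠ 0) (hs : Shape n arr) (h : emptiesOf arr n = (r, c) :: rest) :
    emptiesOf (setCell arr r c v) n = rest := by
  obtain ⟨hrn, hcn, h0⟩ := emptiesOf_head h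
  have hr : r < arr.length := lt_of_lt_of_le hrn hs.1
  have hc : c < (arr.getD r []).length := lt_of_lt_of_le hcn (hs.2 r hrn)
  unfold emptiesOf at h ⊢
  refine filter_eq_cons_surgery (posList n) _ _ (r, c) rest (nodup_posList n) h ?_ ?_
  · rintro ⟨a, b⟩ _ hne
    have : ¬(a = r ∧ b = c ∧ r < arr.length ∧ c < (arr.getD r []).length) := by
      rintro ⟨rfl, rfl, -, -⟩; exact hne rfl
    rw [cellGet_setCell, if_neg this]
  · rw [cellGet_setCell, if_pos ⟨rfl, rfl, hr, hc⟩]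
    simpa using hv

theorem shape_setCell {n : Nat} {arr : List (List Int)} (r c : Nat) (v : Int)
    (h : Shape n arr) : Shape n (setCell arr r c v) := by
  refine ⟨by rw [setCell, List.length_modify]; exact h.1, fun r' hr' => ?_⟩
  rw [setCell, getD_modify]
  split_ifs with hh
  · rw [List.length_set]
    obtain ⟨rfl, -⟩ := hh
    exact h.2 r' hr'
  · exact h.2 r' hr'

theorem length_emptiesOf_le (arr : List (List Int)) (n : Nat) :
    (emptiesOf arr n).length ≤ n * n := by
  calc (emptiesOf arr n).length ≤ (posList n).length := List.length_filter_le _ _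
    _ = n * n := by
        have h : posList n = List.range n ×ˢ List.range n := rfl
        rw [h, List.length_product, List.length_range]

theorem empties_eq (arr : List (List Int)) (n : Nat) :
    ((List.range n).flatMap fun r =>
      ((List.range n).filter fun c => (arr.getD r []).getD c 0 == 0).map fun c => (r, c)) =
    emptiesOf arr n := by
  unfold emptiesOf posList
  simp only [List.filter_flatMap, List.filter_map]
  rfl

theorem mainEquiv (n : Nat) (es : List (Nat × Nat)) :
    ∀ (fuel : Nat) (arr : List (List Int)) (rows cols : List (PySem.Set Int)),
      Shape n arr →
      rows.length = n → cols.length = n →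
      es.length < fuel →
      emptiesOf arr n = es →
      (∀ r < n, ∀ num : Int, 1 ≤ num → ((rows.getD r []).contains num = checkRow arr r num n)) →
      (∀ c < n, ∀ num : Int, 1 ≤ num → ((cols.getD c []).contains num = checkCol arr c num n)) →
      fillGo n fuel arr = solveB n es rows cols := by
  induction es with
  | nil =>
    intro fuel arr rows cols _ _ _ hfuel hemp _ _
    cases fuel with
    | zero => omega
    | succ f =>
      have hge : getEmpty arr n = none := by rw [getEmpty_eq, hemp]; rfl
      simp [fillGo, hge, solveB]
  | cons hd rest ih =>
    obtain ⟨r, c⟩ := hd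
    intro fuel arr rows cols hs hrl hcl hfuel hemp hrows hcols
    cases fuel with
    | zero => simp at hfuel
    | succ f =>
      obtain ⟨hrn, hcn, h0⟩ := emptiesOf_head hemp
      have hr : r < arr.length := lt_of_lt_of_le hrn hs.1
      have hc : c < (arr.getD r []).length := lt_of_lt_of_le hcn (hs.2 r hrn)
      have hge : getEmpty arr n = some (r, c) := by rw [getEmpty_eq, hemp]; rfl
      simp only [fillGo, hge, solveB]
      refine congrArg (List.range n).any (funext fun k => ?_)
      have hnum1 : (1 : Int) ≤ (k : Int) + 1 := by omega
      have hnum0 : ((k : Int) + 1) ≠ 0 := by omega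
      have hgr := hrows r hrn ((k : Int) + 1) hnum1
      have hgc := hcols c hcn ((k : Int) + 1) hnum1
      have hrec : fillGo n f (setCell arr r c ((k : Int) + 1)) =
          solveB n rest (rows.modify r (fun s => s.add ((k : Int) + 1)))
                        (cols.modify c (fun s => s.add ((k : Int) + 1))) := by
        refine ih f _ _ _ (shape_setCell r c _ hs)
          (by rw [List.length_modify]; exact hrl)
          (by rw [List.length_modify]; exact hcl)
          (by simp only [List.length_cons] at hfuel; omega)
          (emptiesOf_setCell _ hnum0 hs hemp) ?_ ?_
        · intro r'' h'' num' h1'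
          have hn0' : num' ≠ 0 := by omega
          rw [getD_modify]
          by_cases hrr : r'' = r
          · subst hrr
            rw [if_pos ⟨rfl, by omega⟩, contains_add,
              checkRow_setCell_eq arr r'' c _ num' n hr hc hcn h0 hn0',
              hrows r'' h'' num' h1']
          · rw [if_neg (by tauto), checkRow_setCell_ne arr r c _ r'' num' n hrr]
            exact hrows r'' h'' num' h1'
        · intro c'' h'' num' h1'
          have hn0' : num' ≠ 0 := by omega
          rw [getD_modify]
          by_cases hcc : c'' = c
          · subst hcc
            rw [if_pos ⟨rfl, by omega⟩, contains_add,
              checkCol_setCell_eq arr r c'' _ num' n hr hc hrn h0 hn0',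
              hcols c'' h'' num' h1']
          · rw [if_neg (by tauto), checkCol_setCell_ne arr r c _ c'' num' n hcc]
            exact hcols c'' h'' num' h1'
      rw [checkSafe, hrec, ← hgr, ← hgc, Bool.and_assoc]

-- ===== VERDICT (by name: the statement is the Claim_ definition above) =====
theorem fillSquare_spec : Claim_equal_fillSquare := by
  intro arr _ hpre
  unfold Spec_fillSquare fillSquare fillSquare_alt
  have hs : Shape arr.length arr := by
    refine ⟨le_refl _, fun r hr => ?_⟩
    rw [List.getD_eq_getElem?_getD, List.getElem?_eq_getElem hr]
    exact hpre _ (List.getElem_mem hr)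
  have hlenrow : ∀ r < arr.length, arr.length ≤ (arr.getD r []).length := hs.2
  refine mainEquiv arr.length _ _ arr _ _ hs
    (by rw [List.length_map, List.length_range])
    (by rw [List.length_map, List.length_range])
    ?_ (empties_eq arr arr.length).symm ?_ ?_
  · rw [empties_eq arr arr.length]
    exact Nat.lt_succ_of_le (length_emptiesOf_le arr arr.length)
  · intro r hr num _
    rw [PySem.List.getD_map_range _ _ _ _ hr, Bool.eq_iff_iff, PySem.Set.contains_iff,
      PySem.Set.mem_ofList, checkRow_iff]
    have hlen : arr.length ≤ (arr.getD r []).length := hlenrow r hr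
    constructor
    · intro hm
      obtain ⟨i, hi, hEq⟩ := List.mem_iff_getElem.1 hm
      rw [List.length_take] at hi
      have hin : i < arr.length := lt_of_lt_of_le hi (Nat.min_le_left _ _)
      refine ⟨i, hin, ?_⟩
      rw [List.getElem_take] at hEq
      rw [cellGet, List.getD_eq_getElem?_getD, List.getElem?_eq_getElem (by omega)]
      exact hEq
    · rintro ⟨i, hin, hEq⟩
      have hl : i < ((arr.getD r []).take arr.length).length := by
        rw [List.length_take]; omega
      have : ((arr.getD r []).take arr.length)[i] = num := by
        rw [List.getElem_take]
        rw [cellGet, List.getD_eq_getElem?_getD, List.getElem?_eq_getElem (by omega)] at hEq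
        exact hEq
      exact this ▸ List.getElem_mem hl
  · intro c hcn num _
    rw [PySem.List.getD_map_range _ _ _ _ hcn, Bool.eq_iff_iff, PySem.Set.contains_iff,
      PySem.Set.mem_ofList, checkCol_iff]
    constructor
    · intro hm
      obtain ⟨i, hi, hEq⟩ := List.mem_map.1 hm
      exact ⟨i, List.mem_range.1 hi, hEq⟩
    · rintro ⟨i, hin, hEq⟩
      exact List.mem_map.2 ⟨i, List.mem_range.2 hin, hEq⟩
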